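-- pv_equiv track=rewrite | github.com/pranjal1712/Enerlytics-AI | backend/rag.py | trim_chunks
-- ===== SOURCE A (Python) =====
-- def trim_chunks(chunks, max_tokens=2000):
--     # A simple approximation: 1 token ~ 4 chars
--     current_tokens = 0
--     trimmed = []
--     for c in chunks:
--         tokens = len(c) // 4
--         if current_tokens + tokens > max_tokens:
--             break
--         trimmed.append(c)
--         current_tokens += tokens
--     return trimmed
-- ===== SOURCE B (Python) =====
-- def trim_chunks(chunks, max_tokens=2000):
--     # Token counts (len//4) are non-negative, so the prefix sums are
--     # non-decreasing: build them once, then BINARY-SEARCH for the first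
--     # prefix total strictly exceeding the budget.
--     prefix = []
--     total = 0
--     for c in chunks:
--         total += len(c) // 4
--         prefix.append(total)
--     lo, hi = 0, len(prefix)
--     while lo < hi:
--         mid = (lo + hi) // 2
--         if prefix[mid] > max_tokens:
--             hi = mid
--         else:
--             lo = mid + 1
--     return chunks[:lo]
-- ===== Notes on version B (the rewrite author's own statement) =====
-- stated objective: alternative
-- what changed: Instead of a running-sum loop that breaks mid-iteration, B builds the (monotone, since len//4 >= 0) prefix-sum table and locates the cutoff with an explicit binary search, then slices chunks[:lo].
import Mathlib
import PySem

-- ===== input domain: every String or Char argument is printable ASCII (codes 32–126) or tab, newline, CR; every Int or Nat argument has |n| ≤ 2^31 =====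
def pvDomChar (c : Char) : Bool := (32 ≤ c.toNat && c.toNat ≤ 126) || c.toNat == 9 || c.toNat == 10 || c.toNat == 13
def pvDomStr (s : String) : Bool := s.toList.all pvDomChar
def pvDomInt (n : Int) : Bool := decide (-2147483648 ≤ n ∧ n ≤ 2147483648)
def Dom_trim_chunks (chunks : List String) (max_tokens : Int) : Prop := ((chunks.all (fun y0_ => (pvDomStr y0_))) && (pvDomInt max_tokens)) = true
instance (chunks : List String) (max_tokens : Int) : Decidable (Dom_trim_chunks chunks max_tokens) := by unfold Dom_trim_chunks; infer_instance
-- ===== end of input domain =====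

-- B replaces A's break-mid-loop accumulator with a monotone prefix-sum table plus an explicit binary search for the cutoff (objective: alternative).

-- ===== PORT A =====
-- loop over chunks carrying current_tokens; break = return accumulated prefix
def trimA_loop (mt : Int) : List String → Int → List String
  | [], _ => []
  | c :: cs, cur =>
    let tokens := PySem.Int.floordiv (PySem.Str.len c) 4
    if cur + tokens > mt then []
    else c :: trimA_loop mt cs (cur + tokens)

def trim_chunks (chunks : List String) (max_tokens : Int) : List String :=
  trimA_loop max_tokens chunks 0

-- ===== PORT B =====
-- the prefix-building loop: total += len(c)//4; prefix.append(total)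
def pvPrefixLoop : List String → Int → List Int
  | [], _ => []
  | c :: cs, total =>
    let t := total + PySem.Int.floordiv (PySem.Str.len c) 4
    t :: pvPrefixLoop cs t

-- the while-loop binary search; prefix[mid] is always in range (0 ≤ lo ≤ mid < hi ≤ len), so getD is exact
def pvBisect (a : List Int) (x : Int) (lo hi : Nat) : Nat :=
  if _h : lo < hi then
    let mid := (lo + hi) / 2
    if a.getD mid 0 > x then pvBisect a x lo mid
    else pvBisect a x (mid + 1) hi
  else lo
termination_by hi - lo
decreasing_by all_goals omega

def trim_chunks_alt (chunks : List String) (max_tokens : Int) : List String :=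
  let pre := pvPrefixLoop chunks 0
  let lo := pvBisect pre max_tokens 0 pre.length
  chunks.take lo

-- ===== PRECONDITION & SPEC =====
def Spec_trim_chunks (chunks : List String) (max_tokens : Int) (out : List String) : Prop := out = trim_chunks_alt chunks max_tokens
instance (chunks : List String) (max_tokens : Int) (out : List String) : Decidable (Spec_trim_chunks chunks max_tokens out) := by unfold Spec_trim_chunks; infer_instance

-- ===== CLAIM (what is proved, stated in full; the proofs are below) =====
def Claim_equal_trim_chunks : Prop := ∀ (chunks : List String) (max_tokens : Int), Dom_trim_chunks chunks max_tokens → Spec_trim_chunks chunks max_tokens (trim_chunks chunks max_tokens)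

-- ===== LEMMAS AND PROOFS =====

-- index of the first prefix total exceeding the budget (proof-only characterisation)
def pvFirstOver (mt : Int) : List Int → Nat
  | [] => 0
  | t :: ts => if t > mt then 0 else pvFirstOver mt ts + 1

-- A's loop returns exactly the prefix of length pvFirstOver
theorem trimA_eq_take (mt : Int) (cs : List String) (cur : Int) :
    trimA_loop mt cs cur = cs.take (pvFirstOver mt (pvPrefixLoop cs cur)) := by
  induction cs generalizing cur with
  | nil => simp [trimA_loop, pvPrefixLoop, pvFirstOver]
  | cons c cs ih =>
    simp only [trimA_loop, pvPrefixLoop, pvFirstOver]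
    split
    · simp
    · simp [ih]

theorem tok_nonneg (c : String) : 0 ≤ PySem.Int.floordiv (PySem.Str.len c) 4 := by
  rw [PySem.Int.floordiv_eq_ediv_of_pos (by norm_num : (0:Int) < 4)]
  exact Int.ediv_nonneg (by simp [PySem.Str.len_eq]) (by norm_num)

theorem prefix_lb (cs : List String) (s : Int) :
    ∀ y ∈ pvPrefixLoop cs s, s ≤ y := by
  induction cs generalizing s with
  | nil => simp [pvPrefixLoop]
  | cons c cs ih =>
    intro y hy
    simp only [pvPrefixLoop, List.mem_cons] at hy
    have h0 := tok_nonneg c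
    rcases hy with h | h
    · omega
    · have := ih _ _ h; omega

theorem prefix_sorted (cs : List String) (s : Int) :
    (pvPrefixLoop cs s).Pairwise (· ≤ ·) := by
  induction cs generalizing s with
  | nil => simp [pvPrefixLoop]
  | cons c cs ih =>
    simp only [pvPrefixLoop]
    exact List.Pairwise.cons (fun y hy => prefix_lb cs _ y hy) (ih _)

theorem firstOver_le_length (mt : Int) (a : List Int) : pvFirstOver mt a ≤ a.length := by
  induction a with
  | nil => simp [pvFirstOver]
  | cons t ts ih => by_cases h : t > mt <;> simp [pvFirstOver, h] <;> omega

theorem firstOver_lt (mt : Int) (a : List Int) :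
    ∀ i, i < pvFirstOver mt a → a.getD i 0 ≤ mt := by
  induction a with
  | nil => simp [pvFirstOver]
  | cons t ts ih =>
    intro i hi
    by_cases h : t > mt
    · simp [pvFirstOver, h] at hi
    · simp only [pvFirstOver, if_neg h] at hi
      cases i with
      | zero => simpa using le_of_not_gt h
      | succ j => simpa using ih j (by omega)

theorem firstOver_self (mt : Int) (a : List Int) (h : pvFirstOver mt a < a.length) :
    a.getD (pvFirstOver mt a) 0 > mt := by
  induction a with
  | nil => simp at h
  | cons t ts ih =>
    by_cases ht : t > mt
    · simpa [pvFirstOver, ht] using ht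
    · simp only [pvFirstOver, if_neg ht] at h ⊢
      simpa using ih (by simpa using h)

theorem sorted_getD_mono (a : List Int) (hs : a.Pairwise (· ≤ ·)) (i j : Nat)
    (hij : i ≤ j) (hj : j < a.length) : a.getD i 0 ≤ a.getD j 0 := by
  rcases eq_or_lt_of_le hij with rfl | hlt
  · exact le_refl _
  · have hi : i < a.length := lt_trans hlt hj
    rw [List.getD_eq_getElem a 0 hi, List.getD_eq_getElem a 0 hj]
    exact List.pairwise_iff_getElem.mp hs i j hi hj hlt

theorem firstOver_ge (mt : Int) (a : List Int) (hs : a.Pairwise (· ≤ ·)) :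
    ∀ i, pvFirstOver mt a ≤ i → i < a.length → a.getD i 0 > mt := by
  intro i hfi hi
  have hf : a.getD (pvFirstOver mt a) 0 > mt := firstOver_self mt a (lt_of_le_of_lt hfi hi)
  have := sorted_getD_mono a hs (pvFirstOver mt a) i hfi hi
  omega

theorem bisect_eq_firstOver_aux (a : List Int) (mt : Int) (hs : a.Pairwise (· ≤ ·)) :
    ∀ n lo hi, hi - lo ≤ n → lo ≤ pvFirstOver mt a → pvFirstOver mt a ≤ hi →
      hi ≤ a.length → pvBisect a mt lo hi = pvFirstOver mt a := by
  intro n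
  induction n with
  | zero =>
    intro lo hi hn h1 h2 _
    rw [pvBisect]
    simp only [dif_neg (by omega : ¬ lo < hi)]
    omega
  | succ n ih =>
    intro lo hi hn h1 h2 hlen
    rw [pvBisect]
    by_cases hlh : lo < hi
    · simp only [dif_pos hlh]
      set mid := (lo + hi) / 2 with hmid
      have hmlo : lo ≤ mid := by omega
      have hmhi : mid < hi := by omega
      by_cases hgt : a.getD mid 0 > mt
      · have hle : pvFirstOver mt a ≤ mid := by
          by_contra hc
          have := firstOver_lt mt a mid (by omega)
          omega
        simp only [if_pos hgt]
        exact ih lo mid (by omega) h1 hle (by omega)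
      · have hlt2 : mid < pvFirstOver mt a := by
          by_contra hc
          have := firstOver_ge mt a hs mid (by omega) (by omega)
          omega
        simp only [if_neg hgt]
        exact ih (mid + 1) hi (by omega) (by omega) h2 hlen
    · simp only [dif_neg hlh]
      omega

theorem bisect_eq_firstOver (a : List Int) (mt : Int) (hs : a.Pairwise (· ≤ ·)) :
    pvBisect a mt 0 a.length = pvFirstOver mt a :=
  bisect_eq_firstOver_aux a mt hs a.length 0 a.length (by omega) (by omega)
    (firstOver_le_length mt a) (le_refl _)

-- ===== VERDICT (by name: the statement is the Claim_ definition above) =====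
theorem trim_chunks_spec : Claim_equal_trim_chunks := by
  intro chunks mt _
  unfold Spec_trim_chunks trim_chunks trim_chunks_alt
  simp only []
  rw [bisect_eq_firstOver _ _ (prefix_sorted chunks 0)]
  exact trimA_eq_take mt chunks 0
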